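-- pv_equiv track=rewrite | github.com/PCBZ/AlgorithmPractise | TikTok_oa/SpendItAll.py | spendItAll
-- ===== SOURCE A (Python) =====
-- from typing import List
--
-- def spendItAll(cost: List[int], budget: int) -> int:
--     n = len(cost)
--     purchase = 0
--     i = 0
--     while budget > min(cost):
--         if budget >= cost[i]:
--             budget -= cost[i]
--             purchase += 1
--         i = (i+1) % n
--     return purchase
-- ===== SOURCE B (Python) =====
-- def spendItAll(cost, budget):
--     n = len(cost)
--     m = min(cost)
--     total = sum(cost)
--     purchase = 0
--     if budget > total + m and total > 0:
--         # While budget > total + m, one full cycle buys every item; skip q such cycles at once.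
--         q = (budget - m - 1) // total
--         purchase = q * n
--         budget -= q * total
--     while budget > m:
--         for c in cost:
--             if budget <= m:
--                 break
--             if budget >= c:
--                 budget -= c
--                 purchase += 1
--     return purchase
-- ===== Notes on version B (the rewrite author's own statement) =====
-- stated objective: faster
-- what changed: B skips all full affordable cycles at once via integer division (every item is bought while budget > sum+min), then simulates only the short tail cycle by cycle, instead of A's one-item-at-a-time cyclic simulation.
import Mathlib
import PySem

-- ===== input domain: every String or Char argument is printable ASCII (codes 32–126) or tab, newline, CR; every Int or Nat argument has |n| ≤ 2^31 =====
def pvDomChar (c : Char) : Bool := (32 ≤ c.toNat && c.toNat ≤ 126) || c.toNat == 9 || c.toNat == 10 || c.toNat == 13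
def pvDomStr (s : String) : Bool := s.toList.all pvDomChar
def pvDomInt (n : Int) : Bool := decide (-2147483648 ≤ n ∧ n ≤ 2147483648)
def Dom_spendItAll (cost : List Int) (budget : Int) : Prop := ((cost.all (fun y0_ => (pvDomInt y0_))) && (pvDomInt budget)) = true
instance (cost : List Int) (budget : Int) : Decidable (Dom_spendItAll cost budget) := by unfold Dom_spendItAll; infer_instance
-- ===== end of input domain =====

-- B bulk-skips all full affordable cycles with one integer division, then simulates the short
-- tail cycle by cycle; measurably faster than A's one-item-at-a-time cyclic simulation.

-- ===== PORT A =====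
-- A's while loop; min(cost) is loop-invariant, hoisted as parameter m (same value every iteration).
-- The fuel argument only makes the recursion total; under Pre_ it is proved sufficient, and the
-- loop exits via its own test (¬ m < budget) before fuel runs out.
def spendItAllLoopA (cost : List Int) (m : Int) (n : Nat) : Nat → Int → Int → Nat → Int
  | 0, _, purchase, _ => purchase
  | fuel+1, budget, purchase, i =>
    if m < budget then
      -- cost[i]: i is always in 0..n-1 here (i := (i+1) % n), where List.getD i 0 equals Python's cost[i]
      if cost.getD i 0 ≤ budget then
        spendItAllLoopA cost m n fuel (budget - cost.getD i 0) (purchase + 1) ((i+1) % n)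
      else
        spendItAllLoopA cost m n fuel budget purchase ((i+1) % n)
    else purchase

def spendItAll (cost : List Int) (budget : Int) : Int :=
  match PySem.List.min? cost (fun x => x) with
  | none => 0   -- Python raises ValueError on empty cost; excluded by Pre_
  | some m => spendItAllLoopA cost m cost.length (cost.length * budget.toNat + 1) budget 0 0

-- ===== PORT B =====
-- one pass of B's inner `for c in cost` loop (with the `if budget <= m: break`)
def spendPass (m : Int) : List Int → Int × Int → Int × Int
  | [], st => st
  | c :: cs, (budget, purchase) =>
    if budget ≤ m then (budget, purchase)
    else if c ≤ budget then spendPass m cs (budget - c, purchase + 1)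
    else spendPass m cs (budget, purchase)

-- B's outer `while budget > m` loop; fuel is a totality guard only (proved sufficient under Pre_)
def spendTail (cost : List Int) (m : Int) : Nat → Int → Int → Int
  | 0, _, purchase => purchase
  | fuel+1, budget, purchase =>
    if m < budget then
      let st := spendPass m cost (budget, purchase)
      spendTail cost m fuel st.1 st.2
    else purchase

def spendItAll_alt (cost : List Int) (budget : Int) : Int :=
  match PySem.List.min? cost (fun x => x) with
  | none => 0   -- Python raises ValueError on empty cost; excluded by Pre_
  | some m =>
    let total := cost.sum
    let q : Int := if total + m < budget ∧ 0 < total then PySem.Int.floordiv (budget - m - 1) total else 0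
    let purchase : Int := q * cost.length
    let budget' : Int := budget - q * total
    spendTail cost m (budget'.toNat + 1) budget' purchase

-- ===== PRECONDITION & SPEC =====
-- Pre_ excludes exactly the inputs where Python's A does not return: the empty list (min([]) raises
-- ValueError) and inputs with budget above the minimum but some non-positive cost (A loops forever).
def Pre_spendItAll (cost : List Int) (budget : Int) : Prop :=
  cost ≠ [] ∧ ((∀ c ∈ cost, budget ≤ c) ∨ (∀ c ∈ cost, 0 < c))
instance (cost : List Int) (budget : Int) : Decidable (Pre_spendItAll cost budget) := by
  unfold Pre_spendItAll; infer_instance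

def pvWitness_spendItAll : List Int × Int := ([3, 1, 2], 10)

def Spec_spendItAll (cost : List Int) (budget : Int) (out : Int) : Prop := out = spendItAll_alt cost budget
instance (cost : List Int) (budget : Int) (out : Int) : Decidable (Spec_spendItAll cost budget out) := by unfold Spec_spendItAll; infer_instance

-- ===== CLAIM (what is proved, stated in full; the proofs are below) =====
def Claim_equal_spendItAll : Prop := ∀ (cost : List Int) (budget : Int), Dom_spendItAll cost budget → Pre_spendItAll cost budget → Spec_spendItAll cost budget (spendItAll cost budget)

-- ===== LEMMAS AND PROOFS =====

-- proof-only abbreviation for B's skipped-cycle count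
def spendQ (cost : List Int) (budget m : Int) : Int :=
  if cost.sum + m < budget ∧ 0 < cost.sum then PySem.Int.floordiv (budget - m - 1) cost.sum else 0

lemma spendItAll_some (cost : List Int) (budget m : Int)
    (h : PySem.List.min? cost (fun x => x) = some m) :
    spendItAll cost budget =
      spendItAllLoopA cost m cost.length (cost.length * budget.toNat + 1) budget 0 0 := by
  unfold spendItAll; rw [h]

lemma spendItAll_alt_some (cost : List Int) (budget m : Int)
    (h : PySem.List.min? cost (fun x => x) = some m) :
    spendItAll_alt cost budget =
      spendTail cost m ((budget - spendQ cost budget m * cost.sum).toNat + 1)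
        (budget - spendQ cost budget m * cost.sum) (spendQ cost budget m * cost.length) := by
  unfold spendItAll_alt spendQ; rw [h]

lemma loopA_stop (cost : List Int) (m : Int) (n : Nat) (f : Nat) (b p : Int) (i : Nat)
    (h : ¬ m < b) : spendItAllLoopA cost m n f b p i = p := by
  cases f <;> simp [spendItAllLoopA, h]

lemma loopA_succ (cost : List Int) (m : Int) (n : Nat) (f : Nat) (b p : Int) (i : Nat) :
    spendItAllLoopA cost m n (f+1) b p i =
      if m < b then
        if cost.getD i 0 ≤ b then
          spendItAllLoopA cost m n f (b - cost.getD i 0) (p + 1) ((i+1) % n)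
        else spendItAllLoopA cost m n f b p ((i+1) % n)
      else p := rfl

lemma tail_stop (cost : List Int) (m : Int) (f : Nat) (b p : Int)
    (h : ¬ m < b) : spendTail cost m f b p = p := by
  cases f <;> simp [spendTail, h]

lemma tail_succ (cost : List Int) (m : Int) (f : Nat) (b p : Int) :
    spendTail cost m (f+1) b p =
      if m < b then
        spendTail cost m f (spendPass m cost (b, p)).1 (spendPass m cost (b, p)).2
      else p := rfl

lemma pass_cons (m c : Int) (cs : List Int) (b p : Int) :
    spendPass m (c :: cs) (b, p) =
      if b ≤ m then (b, p)
      else if c ≤ b then spendPass m cs (b - c, p + 1)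
      else spendPass m cs (b, p) := rfl

-- one full cycle of A's loop, starting at index i, equals one spendPass over drop i
lemma cycleA (cost : List Int) (m : Int) :
    ∀ (cs : List Int) (i : Nat) (f : Nat) (b p : Int),
    cost.drop i = cs → i + cs.length = cost.length → cs ≠ [] →
    spendItAllLoopA cost m cost.length (cs.length + f) b p i =
      spendItAllLoopA cost m cost.length f (spendPass m cs (b, p)).1 (spendPass m cs (b, p)).2 0 := by
  intro cs
  induction cs with
  | nil => intro i f b p _ _ h; exact absurd rfl h
  | cons c cs ih =>
    intro i f b p hdrop hlen _
    have hget : cost.getD i 0 = c := by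
      have h1 : cost[i]? = some c := by rw [← List.head?_drop, hdrop]; rfl
      simp [List.getD_eq_getElem?_getD, h1]
    have hdrop' : cost.drop (i+1) = cs := by
      rw [← List.tail_drop, hdrop]; rfl
    simp only [List.length_cons]
    rw [Nat.add_right_comm, loopA_succ, hget, pass_cons]
    by_cases hb : m < b
    · have hbm : ¬ b ≤ m := not_le.mpr hb
      rw [if_pos hb, if_neg hbm]
      have step : ∀ (b' p' : Int),
          spendItAllLoopA cost m cost.length (cs.length + f) b' p' ((i+1) % cost.length) =
            spendItAllLoopA cost m cost.length f (spendPass m cs (b', p')).1 (spendPass m cs (b', p')).2 0 := by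
        intro b' p'
        rcases eq_or_ne cs [] with hnil | hne
        · subst hnil
          have hi : i + 1 = cost.length := by simpa using hlen
          have hmod : (i+1) % cost.length = 0 := by rw [hi]; exact Nat.mod_self _
          simp [spendPass, hmod]
        · have hlt : i + 1 < cost.length := by
            have := List.length_pos_iff.mpr hne
            simp only [List.length_cons] at hlen
            omega
          rw [Nat.mod_eq_of_lt hlt]
          exact ih (i+1) f b' p' hdrop' (by simp only [List.length_cons] at hlen; omega) hne
      by_cases hc : c ≤ b
      · rw [if_pos hc, if_pos hc]; exact step _ _
      · rw [if_neg hc, if_neg hc]; exact step _ _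
    · have hbm : b ≤ m := by omega
      rw [if_neg hb, if_pos hbm]
      exact (loopA_stop cost m cost.length f b p 0 hb).symm

-- budget never increases across a pass (positive costs)
lemma pass_le (m : Int) : ∀ (cs : List Int) (b p : Int), (∀ c ∈ cs, 0 < c) →
    (spendPass m cs (b, p)).1 ≤ b := by
  intro cs
  induction cs with
  | nil => intro b p _; simp [spendPass]
  | cons c cs ih =>
    intro b p hpos
    have hc : 0 < c := hpos c (by simp)
    have hpos' : ∀ x ∈ cs, 0 < x := fun x hx => hpos x (List.mem_cons_of_mem _ hx)
    rw [pass_cons]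
    split_ifs with h1 h2
    · simp
    · have := ih (b - c) (p + 1) hpos'
      omega
    · exact ih b p hpos'

-- a pass either buys the minimum (budget drops by ≥ m) or ends at budget ≤ m
lemma pass_progress (m : Int) : ∀ (cs : List Int) (b p : Int), (∀ c ∈ cs, 0 < c) →
    m ∈ cs → m < b →
    (spendPass m cs (b, p)).1 ≤ b - m ∨ (spendPass m cs (b, p)).1 ≤ m := by
  intro cs
  induction cs with
  | nil => intro b p _ hm; exact absurd hm (List.not_mem_nil)
  | cons c cs ih =>
    intro b p hpos hm hb
    have hpos' : ∀ x ∈ cs, 0 < x := fun x hx => hpos x (List.mem_cons_of_mem _ hx)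
    have hbm : ¬ b ≤ m := not_le.mpr hb
    rw [pass_cons, if_neg hbm]
    rcases List.mem_cons.mp hm with hcm | hm'
    · subst hcm
      rw [if_pos (le_of_lt hb)]
      exact Or.inl (pass_le m cs (b - m) (p + 1) hpos')
    · by_cases hc : c ≤ b
      · rw [if_pos hc]
        by_cases hb' : m < b - c
        · rcases ih (b - c) (p + 1) hpos' hm' hb' with h | h
          · left; have hcpos : 0 < c := hpos c (by simp); omega
          · right; exact h
        · right
          have := pass_le m cs (b - c) (p + 1) hpos'
          omega
      · rw [if_neg hc]
        exact ih b p hpos' hm' hb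

-- with budget above sum + min, a pass buys every item
lemma pass_all (m : Int) (hm : 0 ≤ m) : ∀ (cs : List Int) (b p : Int), (∀ c ∈ cs, 0 < c) →
    m + cs.sum < b →
    spendPass m cs (b, p) = (b - cs.sum, p + cs.length) := by
  intro cs
  induction cs with
  | nil => intro b p _ _; simp [spendPass]
  | cons c cs ih =>
    intro b p hpos hlt
    have hc : 0 < c := hpos c (by simp)
    have hpos' : ∀ x ∈ cs, 0 < x := fun x hx => hpos x (List.mem_cons_of_mem _ hx)
    have hsum : 0 ≤ cs.sum := List.sum_nonneg (fun x hx => le_of_lt (hpos' x hx))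
    simp only [List.sum_cons] at hlt
    rw [pass_cons, if_neg (by omega), if_pos (by omega),
      ih (b - c) (p + 1) hpos' (by omega)]
    simp only [List.sum_cons, List.length_cons, Prod.mk.injEq]
    refine ⟨by ring, by push_cast; ring⟩

lemma tail_fuel_succ (cost : List Int) (m : Int) (hmem : m ∈ cost)
    (hpos : ∀ c ∈ cost, 0 < c) :
    ∀ (k : Nat) (b p : Int), b.toNat ≤ k →
    spendTail cost m k b p = spendTail cost m (k+1) b p := by
  intro k
  induction k with
  | zero =>
    intro b p h0
    have hm : 0 < m := hpos m hmem
    have hb : ¬ m < b := by omega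
    rw [tail_stop _ _ _ _ _ hb, tail_stop _ _ _ _ _ hb]
  | succ k ih =>
    intro b p hk
    by_cases hb : m < b
    · have hm : 0 < m := hpos m hmem
      rw [tail_succ, tail_succ, if_pos hb, if_pos hb]
      have hdec : (spendPass m cost (b, p)).1 ≤ b - 1 := by
        rcases pass_progress m cost b p hpos hmem hb with h | h <;> omega
      exact ih _ _ (by omega)
    · rw [tail_stop _ _ _ _ _ hb, tail_stop _ _ _ _ _ hb]

lemma tail_fuel_ge (cost : List Int) (m : Int) (hmem : m ∈ cost)
    (hpos : ∀ c ∈ cost, 0 < c) :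
    ∀ (k k' : Nat) (b p : Int), b.toNat ≤ k → k ≤ k' →
    spendTail cost m k b p = spendTail cost m k' b p := by
  intro k k' b p hbk hkk'
  induction k', hkk' using Nat.le_induction with
  | base => rfl
  | succ k' hk' ih =>
    rw [ih, tail_fuel_succ cost m hmem hpos k' b p (le_trans hbk hk')]

-- A's loop and B's tail loop compute the same value
lemma loopA_eq_tail (cost : List Int) (m : Int) (hmem : m ∈ cost)
    (hpos : ∀ c ∈ cost, 0 < c) :
    ∀ (k : Nat) (b p : Int), b.toNat ≤ k →
    spendItAllLoopA cost m cost.length (cost.length * k + 1) b p 0 = spendTail cost m k b p := by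
  intro k
  induction k with
  | zero =>
    intro b p h0
    have hm : 0 < m := hpos m hmem
    have hb : ¬ m < b := by omega
    rw [loopA_succ, if_neg hb, tail_stop _ _ _ _ _ hb]
  | succ k ih =>
    intro b p hk
    by_cases hb : m < b
    · have hm : 0 < m := hpos m hmem
      have hA : cost.length * (k+1) + 1 = cost.length + (cost.length * k + 1) := by ring
      rw [hA, cycleA cost m cost 0 (cost.length * k + 1) b p List.drop_zero (by simp)
        (List.ne_nil_of_mem hmem)]
      have hdec : (spendPass m cost (b, p)).1 ≤ b - 1 := by
        rcases pass_progress m cost b p hpos hmem hb with h | h <;> omega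
      rw [ih _ _ (by omega), tail_succ, if_pos hb]
    · rw [loopA_succ, if_neg hb, tail_stop _ _ _ _ _ hb]

-- bulk skip: j full all-buy cycles subtract j*total and add j*n purchases
lemma tail_bulk (cost : List Int) (m : Int) (hmem : m ∈ cost)
    (hpos : ∀ c ∈ cost, 0 < c) :
    ∀ (j : Nat) (k : Nat) (b p : Int), m < b - (j : Int) * cost.sum → b.toNat ≤ k →
    spendTail cost m k b p = spendTail cost m k (b - (j : Int) * cost.sum) (p + (j : Int) * cost.length) := by
  intro j
  induction j with
  | zero => intro k b p _ _; simp
  | succ j ih =>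
    intro k b p hcond hk
    have htot : 0 < cost.sum := List.sum_pos cost hpos (List.ne_nil_of_mem hmem)
    have hm : 0 < m := hpos m hmem
    have hjnn : (0:Int) ≤ (j : Int) * cost.sum :=
      mul_nonneg (Int.natCast_nonneg j) (le_of_lt htot)
    have hexp : ((j+1 : Nat) : Int) * cost.sum = (j : Int) * cost.sum + cost.sum := by
      push_cast; ring
    rw [hexp] at hcond
    have hball : m + cost.sum < b := by omega
    have hbb : m < b := by omega
    obtain ⟨k', rfl⟩ : ∃ k', k = k' + 1 := ⟨k - 1, by omega⟩
    rw [tail_succ, if_pos hbb, pass_all m (le_of_lt hm) cost b p hpos hball]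
    have hcond' : m < (b - cost.sum) - (j : Int) * cost.sum := by omega
    rw [ih k' (b - cost.sum) (p + cost.length) hcond' (by omega)]
    have e1 : b - cost.sum - (j:Int) * cost.sum = b - ((j+1 : Nat) : Int) * cost.sum := by
      push_cast; ring
    have e2 : p + (cost.length:Int) + (j:Int) * cost.length = p + ((j+1 : Nat) : Int) * cost.length := by
      push_cast; ring
    rw [e1, e2]
    exact tail_fuel_ge cost m hmem hpos k' (k'+1) _ _ (by omega) (Nat.le_succ k')


-- ===== VERDICT (by name: the statement is the Claim_ definition above) =====
theorem spendItAll_spec : Claim_equal_spendItAll := by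
  unfold Claim_equal_spendItAll
  intro cost budget _ hpre
  obtain ⟨hne, hcase⟩ := hpre
  unfold Spec_spendItAll
  cases hmin : PySem.List.min? cost (fun x => x) with
  | none => exact absurd ((PySem.List.min?_eq_none_iff cost (fun x => x)).mp hmin) hne
  | some m =>
    have hmem : m ∈ cost := PySem.List.min?_mem hmin
    rw [spendItAll_some cost budget m hmin, spendItAll_alt_some cost budget m hmin]
    by_cases hb : m < budget
    · have hpos : ∀ c ∈ cost, 0 < c := by
        rcases hcase with h | h
        · exact absurd (h m hmem) (not_le.mpr hb)
        · exact h
      have htot : 0 < cost.sum := List.sum_pos cost hpos hne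
      have hm : 0 < m := hpos m hmem
      rw [loopA_eq_tail cost m hmem hpos budget.toNat budget 0 le_rfl]
      by_cases hq : cost.sum + m < budget ∧ 0 < cost.sum
      · have hqe : spendQ cost budget m = PySem.Int.floordiv (budget - m - 1) cost.sum := by
          unfold spendQ; rw [if_pos hq]
        rw [hqe]
        have hfd : PySem.Int.floordiv (budget - m - 1) cost.sum * cost.sum ≤ budget - m - 1 :=
          (PySem.Int.le_floordiv_iff_mul_le htot).mp le_rfl
        have hq1 : 1 ≤ PySem.Int.floordiv (budget - m - 1) cost.sum :=
          (PySem.Int.le_floordiv_iff_mul_le htot).mpr (by omega)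
        set q : Int := PySem.Int.floordiv (budget - m - 1) cost.sum
        have hqnn : 0 ≤ q := by omega
        have hcast : ((q.toNat : Nat) : Int) = q := Int.toNat_of_nonneg hqnn
        have hcond : m < budget - (q.toNat : Int) * cost.sum := by rw [hcast]; omega
        rw [tail_bulk cost m hmem hpos q.toNat budget.toNat budget 0 hcond le_rfl]
        rw [hcast, zero_add]
        have hqt : cost.sum ≤ q * cost.sum := le_mul_of_one_le_left (le_of_lt htot) hq1
        have hfuel : (budget - q * cost.sum).toNat + 1 ≤ budget.toNat := by omega
        exact (tail_fuel_ge cost m hmem hpos ((budget - q * cost.sum).toNat + 1) budget.toNat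
          (budget - q * cost.sum) (q * (cost.length : Int)) (by omega) hfuel).symm
      · have hqe : spendQ cost budget m = 0 := by unfold spendQ; rw [if_neg hq]
        rw [hqe]
        simp only [zero_mul, sub_zero]
        exact tail_fuel_ge cost m hmem hpos budget.toNat (budget.toNat + 1) budget 0 le_rfl
          (Nat.le_succ _)
    · have hq : ¬ (cost.sum + m < budget ∧ 0 < cost.sum) := by
        rintro ⟨h1, h2⟩; omega
      have hqe : spendQ cost budget m = 0 := by unfold spendQ; rw [if_neg hq]
      rw [hqe]
      simp only [zero_mul, sub_zero]
      rw [loopA_succ, if_neg hb, tail_stop _ _ _ _ _ hb]
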